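-- pv_equiv track=rewrite | github.com/thals0/Algorithm | 프로그래머스/lv2/42586. 기능개발/기능개발.py | solution
-- ===== SOURCE A (Python) =====
-- from collections import deque
--
-- def solution(progresses, speeds):
--     answer = []
--     cnt = 1
--     q = deque()
--     for i in range(len(progresses)):
--         if (100-progresses[i]) % speeds[i] == 0:
--             q.append((100-progresses[i]) // speeds[i])
--         else:
--             q.append((100-progresses[i]) // speeds[i] + 1)
--     while q:
--         v = q.popleft()
--         lst = list(q)
--         for i in lst:
--             if v >= i:
--                 q.popleft()
--                 cnt += 1
--             else:
--                 break
--         answer.append(cnt)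
--         cnt = 1
--     return answer
-- ===== SOURCE B (Python) =====
-- def solution(progresses, speeds):
--     answer = []
--     cnt = 0
--     v = 0
--     for p, s in zip(progresses, speeds):
--         d = -((p - 100) // s)  # ceil((100-p)/s), exact for any nonzero s
--         if cnt and d <= v:
--             cnt += 1
--         else:
--             if cnt:
--                 answer.append(cnt)
--             v = d
--             cnt = 1
--     if cnt:
--         answer.append(cnt)
--     return answer
-- ===== Notes on version B (the rewrite author's own statement) =====
-- stated objective: faster
-- what changed: Replaced the deque build pass plus the quadratic while-loop (which copies the remaining queue to a list on every batch) by a single linear pass over zip(progresses, speeds) that keeps the current batch leader's day and a running count, using -((p-100)//s) for ceiling division.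
import Mathlib
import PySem

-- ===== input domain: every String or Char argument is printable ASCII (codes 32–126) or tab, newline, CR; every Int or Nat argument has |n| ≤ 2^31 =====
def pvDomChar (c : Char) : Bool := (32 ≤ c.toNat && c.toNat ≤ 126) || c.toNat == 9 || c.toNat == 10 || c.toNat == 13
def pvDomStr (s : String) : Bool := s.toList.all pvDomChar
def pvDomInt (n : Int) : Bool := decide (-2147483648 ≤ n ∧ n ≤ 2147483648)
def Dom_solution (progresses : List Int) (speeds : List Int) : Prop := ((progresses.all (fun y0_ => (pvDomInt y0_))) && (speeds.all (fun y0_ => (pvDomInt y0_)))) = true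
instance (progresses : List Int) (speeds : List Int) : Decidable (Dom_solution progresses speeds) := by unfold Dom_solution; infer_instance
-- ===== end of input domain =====

-- B replaces A's deque build pass + quadratic batching while-loop by one linear pass
-- tracking the current batch leader's day and a running count (objective: faster).

-- ===== PORT A =====
-- the first for-loop: build the queue of remaining-day counts
def solDaysA (progresses : List Int) (speeds : List Int) : List Int :=
  -- total form pyGetD: Pre_ guarantees i is in range for both lists, speed nonzero
  (PySem.List.pyRange 0 (PySem.List.len progresses) 1).foldl (fun q i =>
    if PySem.Int.mod (100 - PySem.List.pyGetD progresses i 0) (PySem.List.pyGetD speeds i 0) = 0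
    then q ++ [PySem.Int.floordiv (100 - PySem.List.pyGetD progresses i 0) (PySem.List.pyGetD speeds i 0)]
    else q ++ [PySem.Int.floordiv (100 - PySem.List.pyGetD progresses i 0) (PySem.List.pyGetD speeds i 0) + 1]) []

-- the inner for-loop over lst = list(q): pop while v >= head, counting; break otherwise
def solGroup (v : Int) (q : List Int) (cnt : Int) : Int × List Int :=
  match q with
  | [] => (cnt, [])
  | i :: t => if v ≥ i then solGroup v t (cnt + 1) else (cnt, i :: t)

-- needed by solWhile's decreasing_by
theorem solGroup_len (v : Int) (q : List Int) (cnt : Int) :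
    (solGroup v q cnt).2.length ≤ q.length := by
  induction q generalizing cnt with
  | nil => simp [solGroup]
  | cons i t ih =>
    simp only [solGroup]
    split
    · exact le_trans (ih _) (by simp)
    · simp

-- the outer while-loop: pop the leader v, count its batch, append cnt, reset cnt = 1
def solWhile (q : List Int) : List Int :=
  match q with
  | [] => []
  | v :: rest =>
    let g := solGroup v rest 1
    g.1 :: solWhile g.2
termination_by q.length
decreasing_by
  simpa using Nat.lt_succ_of_le (solGroup_len v rest 1)

def solution (progresses : List Int) (speeds : List Int) : List Int :=
  solWhile (solDaysA progresses speeds)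

-- ===== PORT B =====
-- state = (answer, cnt, v): answer so far, size of the open batch (0 = none), its leader's day
def solStepB (st : List Int × Int × Int) (pr : Int × Int) : List Int × Int × Int :=
  let d := -(PySem.Int.floordiv (pr.1 - 100) pr.2)
  if st.2.1 ≠ 0 ∧ d ≤ st.2.2 then (st.1, st.2.1 + 1, st.2.2)
  else ((if st.2.1 ≠ 0 then st.1 ++ [st.2.1] else st.1), 1, d)

def solution_alt (progresses : List Int) (speeds : List Int) : List Int :=
  let st := (progresses.zip speeds).foldl solStepB ([], 0, 0)
  if st.2.1 ≠ 0 then st.1 ++ [st.2.1] else st.1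

-- ===== PRECONDITION & SPEC =====
-- A raises unless every index i < len(progresses) has a speed and that speed is nonzero
-- (otherwise IndexError resp. ZeroDivisionError)
def Pre_solution (progresses : List Int) (speeds : List Int) : Prop :=
  progresses.length ≤ speeds.length ∧ ∀ s ∈ speeds.take progresses.length, s ≠ 0
instance (progresses : List Int) (speeds : List Int) : Decidable (Pre_solution progresses speeds) := by unfold Pre_solution; infer_instance

def pvWitness_solution : List Int × List Int := ([93, 30, 55], [1, 30, 5])

def Spec_solution (progresses : List Int) (speeds : List Int) (out : List Int) : Prop := out = solution_alt progresses speeds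
instance (progresses : List Int) (speeds : List Int) (out : List Int) : Decidable (Spec_solution progresses speeds out) := by unfold Spec_solution; infer_instance

-- ===== CLAIM (what is proved, stated in full; the proofs are below) =====
def Claim_equal_solution : Prop := ∀ (progresses : List Int) (speeds : List Int), Dom_solution progresses speeds → Pre_solution progresses speeds → Spec_solution progresses speeds (solution progresses speeds)


-- ===== LEMMAS AND PROOFS =====

-- B's per-pair day, and B's step as a function of that day (proof-only helpers)
def dayB (pr : Int × Int) : Int := -(PySem.Int.floordiv (pr.1 - 100) pr.2)

def solFoldStep (st : List Int × Int × Int) (d : Int) : List Int × Int × Int :=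
  if st.2.1 ≠ 0 ∧ d ≤ st.2.2 then (st.1, st.2.1 + 1, st.2.2)
  else ((if st.2.1 ≠ 0 then st.1 ++ [st.2.1] else st.1), 1, d)

theorem solStepB_eq (st : List Int × Int × Int) (pr : Int × Int) :
    solStepB st pr = solFoldStep st (dayB pr) := rfl

-- ceiling division: A's (if r % s == 0 then r//s else r//s+1) equals B's -((-r)//s), s ≠ 0
theorem ceil_div_eq (r s : Int) (hs : s ≠ 0) :
    (if PySem.Int.mod r s = 0 then PySem.Int.floordiv r s
     else PySem.Int.floordiv r s + 1) = -(PySem.Int.floordiv (-r) s) := by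
  have h1 := PySem.Int.floordiv_mul_add_mod r s
  have h2 := PySem.Int.floordiv_mul_add_mod (-r) s
  set q1 := PySem.Int.floordiv r s with hq1
  set q2 := PySem.Int.floordiv (-r) s with hq2
  set m1 := PySem.Int.mod r s with hm1
  set m2 := PySem.Int.mod (-r) s with hm2
  have hsum : (q1 + q2) * s = -(m1 + m2) := by nlinarith [h1, h2]
  rcases lt_or_gt_of_ne hs with hneg | hpos
  · have b1 := PySem.Int.mod_neg_bounds (a := r) hneg
    have b2 := PySem.Int.mod_neg_bounds (a := -r) hneg
    have hk : q1 + q2 = 0 ∨ q1 + q2 = -1 := by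
      rcases lt_trichotomy (q1 + q2) 0 with h | h | h
      · right; by_contra hne
        have h2' : q1 + q2 ≤ -2 := by omega
        nlinarith
      · left; exact h
      · exfalso
        have h1' : 1 ≤ q1 + q2 := h
        nlinarith
    split
    · rename_i hz
      rw [hz] at hsum
      rcases hk with hk | hk <;> rw [hk] at hsum <;> omega
    · rename_i hz
      have hm1lt : m1 < 0 := lt_of_le_of_ne b1.2 hz
      rcases hk with hk | hk <;> rw [hk] at hsum <;> omega
  · have b1 : 0 ≤ m1 ∧ m1 < s := ⟨PySem.Int.mod_nonneg (a := r) hpos, PySem.Int.mod_lt (a := r) hpos⟩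
    have b2 : 0 ≤ m2 ∧ m2 < s := ⟨PySem.Int.mod_nonneg (a := -r) hpos, PySem.Int.mod_lt (a := -r) hpos⟩
    have hk : q1 + q2 = 0 ∨ q1 + q2 = -1 := by
      rcases lt_trichotomy (q1 + q2) 0 with h | h | h
      · right; by_contra hne
        have h2' : q1 + q2 ≤ -2 := by omega
        nlinarith
      · left; exact h
      · exfalso
        have h1' : 1 ≤ q1 + q2 := h
        nlinarith
    split
    · rename_i hz
      rw [hz] at hsum
      rcases hk with hk | hk <;> rw [hk] at hsum <;> omega
    · rename_i hz
      have hm1pos : 0 < m1 := lt_of_le_of_ne b1.1 (Ne.symm hz)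
      rcases hk with hk | hk <;> rw [hk] at hsum <;> omega

-- A's first pass produces exactly B's days of the zipped pairs (under Pre_)
theorem solDaysA_eq (progresses speeds : List Int)
    (hlen : progresses.length ≤ speeds.length)
    (hnz : ∀ s ∈ speeds.take progresses.length, s ≠ 0) :
    solDaysA progresses speeds = (progresses.zip speeds).map dayB := by
  unfold solDaysA
  have hbody : (fun (q : List Int) (i : Int) =>
      if PySem.Int.mod (100 - PySem.List.pyGetD progresses i 0) (PySem.List.pyGetD speeds i 0) = 0
      then q ++ [PySem.Int.floordiv (100 - PySem.List.pyGetD progresses i 0) (PySem.List.pyGetD speeds i 0)]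
      else q ++ [PySem.Int.floordiv (100 - PySem.List.pyGetD progresses i 0) (PySem.List.pyGetD speeds i 0) + 1])
      = fun q i => q ++ [if PySem.Int.mod (100 - PySem.List.pyGetD progresses i 0) (PySem.List.pyGetD speeds i 0) = 0
              then PySem.Int.floordiv (100 - PySem.List.pyGetD progresses i 0) (PySem.List.pyGetD speeds i 0)
              else PySem.Int.floordiv (100 - PySem.List.pyGetD progresses i 0) (PySem.List.pyGetD speeds i 0) + 1] := by
    funext q i
    split <;> rfl
  rw [hbody]
  rw [PySem.List.foldl_append_singleton_eq_map]
  simp only [PySem.List.len_eq]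
  rw [PySem.List.pyRange_zero_natCast]
  rw [List.map_map]
  apply List.ext_getElem
  · simp [Nat.min_eq_left hlen]
  · intro k hk1 hk2
    simp only [List.nil_append, List.length_map, List.length_range] at hk1
    simp only [List.nil_append, List.getElem_map, List.getElem_range, Function.comp_apply,
      List.getElem_zip]
    have hks : k < speeds.length := lt_of_lt_of_le hk1 hlen
    have hsnz : speeds[k] ≠ 0 := by
      apply hnz
      rw [List.mem_take_iff_getElem]
      exact ⟨k, by omega, rfl⟩
    rw [PySem.List.pyGetD_natCast, PySem.List.pyGetD_natCast]
    rw [List.getD_eq_getElem _ _ hk1, List.getD_eq_getElem _ _ hks]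
    rw [ceil_div_eq _ _ hsnz]
    simp [dayB]

-- B's fold with an open batch (0 < cnt) finalizes to A's batching of the remaining days
theorem foldB_inv (ds : List Int) : ∀ (ans : List Int) (cnt v : Int), 0 < cnt →
    (let st := ds.foldl solFoldStep (ans, cnt, v);
     if st.2.1 ≠ 0 then st.1 ++ [st.2.1] else st.1)
    = ans ++ ((solGroup v ds cnt).1 :: solWhile (solGroup v ds cnt).2) := by
  induction ds with
  | nil =>
    intro ans cnt v hc
    simp [solGroup, solWhile, Int.ne_of_gt hc]
  | cons d t ih =>
    intro ans cnt v hc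
    simp only [List.foldl_cons]
    by_cases hd : d ≤ v
    · have hstep : solFoldStep (ans, cnt, v) d = (ans, cnt + 1, v) := by
        simp [solFoldStep, Int.ne_of_gt hc, hd]
      rw [hstep, ih ans (cnt + 1) v (by omega)]
      have hg : solGroup v (d :: t) cnt = solGroup v t (cnt + 1) := by
        simp [solGroup, hd]
      rw [hg]
    · have hstep : solFoldStep (ans, cnt, v) d = (ans ++ [cnt], 1, d) := by
        simp [solFoldStep, hd, Int.ne_of_gt hc]
      rw [hstep, ih (ans ++ [cnt]) 1 d one_pos]
      have hg : solGroup v (d :: t) cnt = (cnt, d :: t) := by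
        simp [solGroup, hd]
      rw [hg]
      simp [solWhile, List.append_assoc]

-- A's batching while-loop equals B's fold-and-finalize, on any day list
theorem solWhile_eq_foldB (ds : List Int) :
    solWhile ds
    = (let st := ds.foldl solFoldStep ([], 0, 0);
       if st.2.1 ≠ 0 then st.1 ++ [st.2.1] else st.1) := by
  cases ds with
  | nil => simp [solWhile]
  | cons d t =>
    simp only [List.foldl_cons]
    have hstep : solFoldStep ([], 0, 0) d = ([], 1, d) := by
      simp [solFoldStep]
    rw [hstep, foldB_inv t [] 1 d one_pos]
    simp [solWhile]

-- ===== VERDICT (by name: the statement is the Claim_ definition above) =====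
theorem solution_spec : Claim_equal_solution := by
  intro progresses speeds _ hpre
  unfold Spec_solution solution solution_alt
  rw [solDaysA_eq progresses speeds hpre.1 hpre.2, solWhile_eq_foldB]
  simp only [List.foldl_map]
  simp only [← solStepB_eq]
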